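-- pv_equiv track=rewrite | github.com/thom-heinrich/twinr | src/twinr/proactive/wakeword.py | _candidate_segments
-- ===== SOURCE A (Python) =====
-- _LEADING_WAKEWORD_FILLERS = frozenset(
--     {
--         "ja",
--         "na",
--         "hm",
--         "hmm",
--         "äh",
--         "eh",
--         "oh",
--         "ah",
--         "also",
--         "hallo",
--         "hey",
--         "he",
--         "hi",
--         "bitte",
--         "mal",
--         "du",
--     }
-- )
--
-- _MAX_LEADING_WAKEWORD_FILLERS = 2
--
-- def _candidate_segments(
--     normalized_words: list[str],
--     phrase_word_count: int,
-- ) -> list[tuple[int, str]]: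
--     if len(normalized_words) < phrase_word_count:
--         return []
--     last_start = len(normalized_words) - phrase_word_count
--     segments: list[tuple[int, str]] = []
--     for start_index in range(0, min(_MAX_LEADING_WAKEWORD_FILLERS, last_start) + 1):
--         if start_index > 0:
--             leading_words = normalized_words[:start_index]
--             if any(word not in _LEADING_WAKEWORD_FILLERS for word in leading_words):
--                 continue
--         segment = " ".join(normalized_words[start_index : start_index + phrase_word_count])
--         segments.append((start_index, segment))
--     return segments
-- ===== SOURCE B (Python) =====
-- _LEADING_WAKEWORD_FILLERS = frozenset(
--     {
--         "ja", "na", "hm", "hmm", "äh", "eh", "oh", "ah", "also",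
--         "hallo", "hey", "he", "hi", "bitte", "mal", "du",
--     }
-- )
--
-- _MAX_LEADING_WAKEWORD_FILLERS = 2
--
--
-- def _candidate_segments(normalized_words, phrase_word_count):
--     last_start = len(normalized_words) - phrase_word_count
--     if last_start < 0:
--         return []
--     cap = min(_MAX_LEADING_WAKEWORD_FILLERS, last_start)
--     # length of the leading run of filler words
--     run = 0
--     for word in normalized_words:
--         if word not in _LEADING_WAKEWORD_FILLERS:
--             break
--         run += 1
--     # every start up to `top` has an all-filler prefix; if the whole list is
--     # fillers, every prefix qualifies, so only the cap limits the starts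
--     top = cap if run == len(normalized_words) else min(run, cap)
--     return [
--         (s, " ".join(normalized_words[s : s + phrase_word_count]))
--         for s in range(top + 1)
--     ]
-- ===== Notes on version B (the rewrite author's own statement) =====
-- stated objective: simpler
-- what changed: Instead of re-scanning the prefix normalized_words[:start_index] inside each loop iteration, B measures the leading filler run once with a single pass, derives the largest admissible start, and builds the result with one comprehension over range(top+1).
import Mathlib
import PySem

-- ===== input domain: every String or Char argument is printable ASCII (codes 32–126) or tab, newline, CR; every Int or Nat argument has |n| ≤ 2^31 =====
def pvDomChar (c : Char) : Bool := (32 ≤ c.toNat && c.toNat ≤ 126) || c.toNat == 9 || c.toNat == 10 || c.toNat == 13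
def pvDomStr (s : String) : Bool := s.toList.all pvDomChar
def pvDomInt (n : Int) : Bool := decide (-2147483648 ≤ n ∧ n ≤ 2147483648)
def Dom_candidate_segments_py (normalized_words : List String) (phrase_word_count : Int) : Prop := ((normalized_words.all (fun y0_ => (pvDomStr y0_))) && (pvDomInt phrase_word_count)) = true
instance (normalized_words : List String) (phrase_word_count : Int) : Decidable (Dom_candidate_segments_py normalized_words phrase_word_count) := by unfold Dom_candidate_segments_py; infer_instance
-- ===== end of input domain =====

-- B replaces A's per-start re-scan of the word prefix by one leading-filler-run scan
-- followed by a single comprehension over the admissible starts (objective: simpler).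

-- ===== PORT A =====
def pyFillers : List String :=
  ["ja", "na", "hm", "hmm", "äh", "eh", "oh", "ah", "also",
   "hallo", "hey", "he", "hi", "bitte", "mal", "du"]

def candidate_segments_py (normalized_words : List String) (phrase_word_count : Int) : List (Int × String) :=
  if (normalized_words.length : Int) < phrase_word_count then []
  else
    let last_start : Int := (normalized_words.length : Int) - phrase_word_count
    (PySem.List.pyRange 0 (min 2 last_start + 1) 1).foldl
      (fun segments start_index =>
        if start_index > 0 then
          let leading_words := PySem.List.slice normalized_words none (some start_index)
          if leading_words.any (fun word => decide (word ∉ pyFillers)) then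
            segments
          else
            segments ++ [(start_index,
              PySem.Str.join " " (PySem.List.slice normalized_words (some start_index) (some (start_index + phrase_word_count))))]
        else
          segments ++ [(start_index,
            PySem.Str.join " " (PySem.List.slice normalized_words (some start_index) (some (start_index + phrase_word_count))))])
      []

-- ===== PORT B =====
-- the 'for word in …: if word not in fillers: break; run += 1' loop of Source B
def pvFillerRun (ws : List String) : Int :=
  match ws with
  | [] => 0
  | w :: ws' => if w ∈ pyFillers then pvFillerRun ws' + 1 else 0

def candidate_segments_py_alt (normalized_words : List String) (phrase_word_count : Int) : List (Int × String) :=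
  let last_start : Int := (normalized_words.length : Int) - phrase_word_count
  if last_start < 0 then []
  else
    let cap : Int := min 2 last_start
    let run : Int := pvFillerRun normalized_words
    let top : Int := if run = (normalized_words.length : Int) then cap else min run cap
    (PySem.List.pyRange 0 (top + 1) 1).map
      (fun s => (s, PySem.Str.join " " (PySem.List.slice normalized_words (some s) (some (s + phrase_word_count)))))

-- ===== PRECONDITION & SPEC =====
def Spec_candidate_segments_py (normalized_words : List String) (phrase_word_count : Int) (out : List (Int × String)) : Prop := out = candidate_segments_py_alt normalized_words phrase_word_count
instance (normalized_words : List String) (phrase_word_count : Int) (out : List (Int × String)) : Decidable (Spec_candidate_segments_py normalized_words phrase_word_count out) := by unfold Spec_candidate_segments_py; infer_instance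

-- ===== CLAIM (what is proved, stated in full; the proofs are below) =====
def Claim_equal_candidate_segments_py : Prop := ∀ (normalized_words : List String) (phrase_word_count : Int), Dom_candidate_segments_py normalized_words phrase_word_count → Spec_candidate_segments_py normalized_words phrase_word_count (candidate_segments_py normalized_words phrase_word_count)

-- ===== LEMMAS AND PROOFS =====

theorem pvFillerRun_nonneg (ws : List String) : 0 ≤ pvFillerRun ws := by
  induction ws with
  | nil => simp [pvFillerRun]
  | cons w ws ih => simp only [pvFillerRun]; split <;> omega

theorem pvFillerRun_le_length (ws : List String) : pvFillerRun ws ≤ (ws.length : Int) := by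
  induction ws with
  | nil => simp [pvFillerRun]
  | cons w ws ih =>
    simp only [pvFillerRun, List.length_cons]
    split <;> [push_cast; push_cast] <;> omega

-- the leading-filler-run characterisation: a prefix take m is all fillers
-- iff m reaches at most the run (or swallows the whole list)
theorem take_all_filler_iff (ws : List String) (m : Nat) :
    ((ws.take m).all (fun w => decide (w ∈ pyFillers)) = true) ↔
      ((min (m : Int) (ws.length : Int)) ≤ pvFillerRun ws) := by
  induction ws generalizing m with
  | nil => simp [pvFillerRun]
  | cons w ws ih =>
    cases m with
    | zero =>
      have := pvFillerRun_nonneg (w :: ws)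
      simp; omega
    | succ m =>
      simp only [List.take_succ_cons, List.all_cons, Bool.and_eq_true, decide_eq_true_eq,
        pvFillerRun, List.length_cons]
      have h2 := ih m
      have h3 := pvFillerRun_le_length ws
      have h0 := pvFillerRun_nonneg ws
      by_cases hw : w ∈ pyFillers
      · rw [if_pos hw]
        constructor
        · rintro ⟨-, h⟩
          have := h2.mp h
          push_cast
          omega
        · intro h
          refine ⟨hw, h2.mpr ?_⟩
          push_cast at h
          omega
      · rw [if_neg hw]
        constructor
        · rintro ⟨hww, -⟩; exact absurd hww hw
        · intro h; push_cast at h; omega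

theorem candidate_segments_py_spec_aux (nw : List String) (pwc : Int) :
    candidate_segments_py nw pwc = candidate_segments_py_alt nw pwc := by
  by_cases hlt : (nw.length : Int) < pwc
  · have hls : (nw.length : Int) - pwc < 0 := by omega
    simp [candidate_segments_py, candidate_segments_py_alt, hlt, hls]
  · have hls : ¬ ((nw.length : Int) - pwc < 0) := by omega
    simp only [candidate_segments_py, candidate_segments_py_alt, if_neg hlt, if_neg hls]
    set last_start : Int := (nw.length : Int) - pwc with hdefls
    set cap : Int := min 2 last_start with hdefcap
    set run : Int := pvFillerRun nw with hdefrun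
    set top : Int := if run = (nw.length : Int) then cap else min run cap with hdeftop
    set f : Int → Int × String := fun s =>
      (s, PySem.Str.join " " (PySem.List.slice nw (some s) (some (s + pwc)))) with hf
    have hcap0 : 0 ≤ cap := by omega
    have hrun0 : 0 ≤ run := pvFillerRun_nonneg nw
    have hrunlen : run ≤ (nw.length : Int) := pvFillerRun_le_length nw
    have htop0 : 0 ≤ top := by rw [hdeftop]; split <;> omega
    have htopcap : top ≤ cap := by rw [hdeftop]; split <;> omega
    -- the per-element test of A, as a Bool predicate
    set p : Int → Bool := fun s =>
      !(decide (s > 0) &&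
        (PySem.List.slice nw none (some s)).any (fun word => decide (word ∉ pyFillers))) with hp
    -- A's fold body, rewritten as the single-conditional-append shape
    have hfun : (fun (segments : List (Int × String)) (start_index : Int) =>
        if start_index > 0 then
          if (PySem.List.slice nw none (some start_index)).any (fun word => decide (word ∉ pyFillers)) then
            segments
          else
            segments ++ [(start_index,
              PySem.Str.join " " (PySem.List.slice nw (some start_index) (some (start_index + pwc))))]
        else
          segments ++ [(start_index,
            PySem.Str.join " " (PySem.List.slice nw (some start_index) (some (start_index + pwc))))])
        = (fun (acc : List (Int × String)) (s : Int) => if p s then acc ++ [f s] else acc) := by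
      funext acc s
      by_cases hs : s > 0
      · by_cases hb : (PySem.List.slice nw none (some s)).any (fun word => decide (word ∉ pyFillers)) = true
        · have hbP : ∃ x ∈ PySem.List.slice nw none (some s), x ∉ pyFillers := by simpa using hb
          have hNotAll : ¬ ∀ x ∈ PySem.List.slice nw none (some s), x ∈ pyFillers := by
            obtain ⟨x, hx, hxn⟩ := hbP
            exact fun hall => hxn (hall x hx)
          simp [hp, hs, hbP, hNotAll]
        · have hAll : ∀ x ∈ PySem.List.slice nw none (some s), x ∈ pyFillers := by simpa using hb
          have hNotEx : ¬ ∃ x ∈ PySem.List.slice nw none (some s), x ∉ pyFillers := by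
            rintro ⟨x, hx, hxn⟩
            exact hxn (hAll x hx)
          simp [hp, hf, hs, hNotEx]
      · simp [hp, hf, hs]
    rw [hfun, PySem.List.foldl_append_if]
    -- p s holds on 0 ≤ s ≤ cap iff s ≤ top
    have hkey : ∀ s : Int, 0 ≤ s → s ≤ cap → (p s = true ↔ s ≤ top) := by
      intro s hs0 hscap
      by_cases hs : s > 0
      · have hslice : PySem.List.slice nw none (some s) = nw.take s.toNat :=
          PySem.List.slice_to nw hs0
        have hiff := take_all_filler_iff nw s.toNat
        have hcast : ((s.toNat : Int)) = s := Int.toNat_of_nonneg hs0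
        rw [hcast] at hiff
        have hany : (p s = true) ↔ ((nw.take s.toNat).all (fun w => decide (w ∈ pyFillers)) = true) := by
          rw [hp]
          simp only [hs, decide_true, Bool.true_and, hslice, Bool.not_eq_true',
            List.any_eq_false, List.all_eq_true, decide_eq_true_eq, not_not]
        rw [← hdefrun] at hiff
        rw [hany, hiff]
        by_cases hall : run = (nw.length : Int)
        · have htopeq : top = cap := by rw [hdeftop, if_pos hall]
          omega
        · have htopeq : top = min run cap := by rw [hdeftop, if_neg hall]
          omega
      · have : s = 0 := by omega
        subst this
        constructor
        · intro _; omega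
        · intro _; simp [hp]
    -- filter of the 0..cap range with p is the 0..top range
    have hsplit : PySem.List.pyRange 0 (cap + 1) 1 =
        PySem.List.pyRange 0 (top + 1) 1 ++ PySem.List.pyRange (top + 1) (cap + 1) 1 :=
      PySem.List.pyRange_one_append 0 (top + 1) (cap + 1) (by omega) (by omega)
    rw [hsplit, List.filter_append]
    have h1 : (PySem.List.pyRange 0 (top + 1) 1).filter p = PySem.List.pyRange 0 (top + 1) 1 := by
      apply List.filter_eq_self.mpr
      intro s hs
      rw [PySem.List.mem_pyRange_one] at hs
      exact (hkey s hs.1 (by omega)).mpr (by omega)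
    have h2 : (PySem.List.pyRange (top + 1) (cap + 1) 1).filter p = [] := by
      apply List.filter_eq_nil_iff.mpr
      intro s hs
      rw [PySem.List.mem_pyRange_one] at hs
      intro hps
      have := (hkey s (by omega) (by omega)).mp hps
      omega
    rw [h1, h2, List.append_nil, List.nil_append]

-- ===== VERDICT (by name: the statement is the Claim_ definition above) =====
theorem candidate_segments_py_spec : Claim_equal_candidate_segments_py := by
  intro nw pwc _
  unfold Spec_candidate_segments_py
  exact candidate_segments_py_spec_aux nw pwc
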